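-- pv_equiv track=rewrite | github.com/isak-lindbeck/aoc2025 | src/aoc2025/day06.py | part_2
-- ===== SOURCE A (Python) =====
-- import operator
--
-- def part_2(num_lines: list[str]) -> int:
--     out_1 = 0
--     op_line = num_lines[-1]
--     num_lines = num_lines[:len(num_lines) - 1]
--
--     value, op = 0, operator.add
--     for idx, op_char in enumerate(op_line):
--         if op_char != " ":
--             out_1 += value
--             if op_char == "*":
--                 value, op = 1, operator.mul
--             else:
--                 value, op = 0, operator.add
--
--         num = ""
--         for line in num_lines:
--             if line[idx] != " ":
--                 num += line[idx]
--         if num != "":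
--             value = op(value, int(num))
--     out_1 += value
--
--     return out_1
-- ===== SOURCE B (Python) =====
-- def part_2(num_lines: list[str]) -> int:
--     op_line = num_lines[-1]
--     body = num_lines[:len(num_lines) - 1]
--
--     # Phase 1: one pass over columns -> (op char, vertical number string) per column.
--     cols = [(op_line[i], "".join(line[i] for line in body if line[i] != " "))
--             for i in range(len(op_line))]
--
--     # Phase 2: partition columns into groups; a non-space op char starts a new
--     # group (its own column belongs to the new group); leading group is '+'.
--     groups = []
--     cur_op, cur_nums = "+", []
--     for ch, num in cols:
--         if ch != " ":
--             groups.append((cur_op, cur_nums))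
--             cur_op, cur_nums = ch, []
--         if num != "":
--             cur_nums.append(int(num))
--     groups.append((cur_op, cur_nums))
--
--     # Phase 3: evaluate each group ('*' -> product from 1, otherwise sum from 0).
--     total = 0
--     for op_ch, nums in groups:
--         if op_ch == "*":
--             p = 1
--             for n in nums:
--                 p *= n
--             total += p
--         else:
--             total += sum(nums)
--     return total
-- ===== Notes on version B (the rewrite author's own statement) =====
-- stated objective: alternative
-- what changed: A streams over columns flushing an accumulated value at each operator char; B decomposes into three phases: read all column strings, partition columns into operator groups (operator column starting its group), then evaluate each group as a product-from-1 or sum-from-0.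
import Mathlib
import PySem

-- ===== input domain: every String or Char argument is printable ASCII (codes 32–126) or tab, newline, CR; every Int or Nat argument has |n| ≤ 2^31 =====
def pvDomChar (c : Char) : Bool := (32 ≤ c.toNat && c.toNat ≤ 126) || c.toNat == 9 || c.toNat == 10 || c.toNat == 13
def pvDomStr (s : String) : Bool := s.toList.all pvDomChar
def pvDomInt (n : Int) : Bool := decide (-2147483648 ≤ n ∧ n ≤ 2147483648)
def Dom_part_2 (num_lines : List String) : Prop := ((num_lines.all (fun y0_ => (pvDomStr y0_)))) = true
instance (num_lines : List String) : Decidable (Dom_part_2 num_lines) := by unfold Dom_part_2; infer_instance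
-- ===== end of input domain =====

-- B re-decomposes A's streaming flush loop into three phases (read columns, partition into
-- operator groups, evaluate each group); same cost, clearer structure (objective: alternative).

-- ===== PORT A =====
-- vertical read of column idx: the chars line[idx] ≠ ' ' down the body, in order
-- (out-of-range line[idx] is an IndexError in Python: excluded by Pre_, skipped here)
def colChars (body : List String) (idx : Int) : List Char :=
  body.foldl (fun num line =>
    match PySem.Str.pyGet? line idx with
    | some c => if c ≠ ' ' then num ++ [c] else num
    | none => num) []

-- one iteration of A's loop; state (out_1, value, op) with op encoded as isMul : Bool
-- (int(num) failing is a ValueError in Python: excluded by Pre_, .getD 0 here)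
def stepA (body : List String) (st : Int × Int × Bool) (p : Int × Char) : Int × Int × Bool :=
  let (out, value, isMul) := st
  let (idx, ch) := p
  let (out, value, isMul) :=
    if ch ≠ ' ' then
      (out + value, if ch = '*' then (1 : Int) else 0, decide (ch = '*'))
    else (out, value, isMul)
  let num := colChars body idx
  if num ≠ [] then
    (out,
     if isMul then value * (PySem.Int.ofChars? num).getD 0
     else value + (PySem.Int.ofChars? num).getD 0,
     isMul)
  else (out, value, isMul)

def part_2 (num_lines : List String) : Int :=
  let op_line := PySem.List.pyGetD num_lines (-1) ""      -- num_lines[-1] (IndexError on [] excluded by Pre_)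
  let body := PySem.List.slice num_lines none (some (PySem.List.len num_lines - 1))
  let st := (PySem.List.enumerate op_line.toList 0).foldl (stepA body) (0, 0, false)
  st.1 + st.2.1

-- ===== PORT B =====
-- phase-2 step: a non-space op char closes the current group; digits join the current group
def stepB (st : List (Char × List Int) × Char × List Int) (p : Char × List Char) :
    List (Char × List Int) × Char × List Int :=
  let (groups, curOp, curNums) := st
  let (ch, num) := p
  let (groups, curOp, curNums) :=
    if ch ≠ ' ' then (groups ++ [(curOp, curNums)], ch, ([] : List Int))
    else (groups, curOp, curNums)
  if num ≠ [] then (groups, curOp, curNums ++ [(PySem.Int.ofChars? num).getD 0])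
  else (groups, curOp, curNums)

-- phase-3: '*' group is a product from 1, any other group a sum from 0
def evalGroup (g : Char × List Int) : Int :=
  if g.1 = '*' then g.2.foldl (· * ·) 1 else g.2.foldl (· + ·) 0

def part_2_alt (num_lines : List String) : Int :=
  let op_line := PySem.List.pyGetD num_lines (-1) ""
  let body := PySem.List.slice num_lines none (some (PySem.List.len num_lines - 1))
  let chars := op_line.toList
  let cols := (PySem.List.pyRange 0 (PySem.List.len chars) 1).map
      (fun i => (PySem.List.pyGetD chars i ' ', colChars body i))
  let st := cols.foldl stepB ([], '+', [])
  (st.1 ++ [(st.2.1, st.2.2)]).foldl (fun total g => total + evalGroup g) 0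

-- ===== PRECONDITION & SPEC =====
-- Pre_ excludes exactly the inputs where Python A raises: the empty list (IndexError on
-- num_lines[-1]), a body line shorter than the operator line (IndexError on line[idx]),
-- and a non-empty column whose characters int() cannot parse (ValueError).
def Pre_part_2 (num_lines : List String) : Prop :=
  num_lines ≠ [] ∧
  ∀ i < (num_lines.getLast?.getD "").toList.length,
    (∀ line ∈ num_lines.dropLast, i < line.toList.length) ∧
    (((num_lines.dropLast.map (fun line => line.toList.getD i ' ')).filter (· ≠ ' ')) = [] ∨
      (PySem.Int.ofChars? ((num_lines.dropLast.map (fun line => line.toList.getD i ' ')).filter (· ≠ ' '))).isSome)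
instance (num_lines : List String) : Decidable (Pre_part_2 num_lines) := by
  unfold Pre_part_2; infer_instance

def pvWitness_part_2 : List String := ["11", "22", "+*"]

def Spec_part_2 (num_lines : List String) (out : Int) : Prop := out = part_2_alt num_lines
instance (num_lines : List String) (out : Int) : Decidable (Spec_part_2 num_lines out) := by
  unfold Spec_part_2; infer_instance

-- ===== CLAIM (what is proved, stated in full; the proofs are below) =====
def Claim_equal_part_2 : Prop := ∀ (num_lines : List String), Dom_part_2 num_lines → Pre_part_2 num_lines → Spec_part_2 num_lines (part_2 num_lines)

-- ===== LEMMAS AND PROOFS =====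

def evalGroups (gs : List (Char × List Int)) : Int :=
  gs.foldl (fun total g => total + evalGroup g) 0

def finishB (st : List (Char × List Int) × Char × List Int) : Int :=
  evalGroups (st.1 ++ [(st.2.1, st.2.2)])

-- the two folds, specialised to index lists (both ports fold over pyRange after rewriting)
def stepA' (body : List String) (chars : List Char) (st : Int × Int × Bool) (i : Int) :
    Int × Int × Bool :=
  stepA body st (i, PySem.List.pyGetD chars i ' ')

def stepB' (body : List String) (chars : List Char)
    (st : List (Char × List Int) × Char × List Int) (i : Int) :
    List (Char × List Int) × Char × List Int :=
  stepB st (PySem.List.pyGetD chars i ' ', colChars body i)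

lemma evalGroups_append (a b : List (Char × List Int)) :
    evalGroups (a ++ b) = evalGroups a + evalGroups b := by
  simp [evalGroups, PySem.List.foldl_add]

lemma groups_shift (body : List String) (chars : List Char) (idxs : List Int) :
    ∀ gs c ns, finishB (idxs.foldl (stepB' body chars) (gs, c, ns))
      = evalGroups gs + finishB (idxs.foldl (stepB' body chars) ([], c, ns)) := by
  induction idxs with
  | nil =>
    intro gs c ns
    simp [finishB, evalGroups_append]
  | cons i idxs ih =>
    intro gs c ns
    by_cases h1 : PySem.List.pyGetD chars i ' ' = ' ' <;>
      by_cases h2 : colChars body i = [] <;>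
        simp only [List.foldl_cons, stepB', stepB, h1, h2, ne_eq, not_true_eq_false,
          not_false_eq_true, if_true, if_false, ite_true, List.nil_append] <;>
      first
        | exact ih _ _ _
        | (rw [ih, ih [(c, ns)]]; rw [evalGroups_append]; ring)

lemma key (body : List String) (chars : List Char) (idxs : List Int) :
    ∀ (out : Int) (c : Char) (ns : List Int),
      (idxs.foldl (stepA' body chars) (out, evalGroup (c, ns), decide (c = '*'))).1 +
        (idxs.foldl (stepA' body chars) (out, evalGroup (c, ns), decide (c = '*'))).2.1
      = out + finishB (idxs.foldl (stepB' body chars) ([], c, ns)) := by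
  induction idxs with
  | nil =>
    intro out c ns
    simp [finishB, evalGroups]
  | cons i idxs ih =>
    intro out c ns
    have hval : ∀ (e : Char) (ms : List Int) (x : Int),
        (if decide (e = '*') = true then evalGroup (e, ms) * x else evalGroup (e, ms) + x)
          = evalGroup (e, ms ++ [x]) := by
      intro e ms x
      by_cases hc : e = '*' <;> simp [evalGroup, hc, List.foldl_append]
    have hinit : ∀ e : Char, (if e = '*' then (1 : Int) else 0) = evalGroup (e, []) := by
      intro e; by_cases hc : e = '*' <;> simp [evalGroup, hc]
    by_cases h1 : PySem.List.pyGetD chars i ' ' = ' ' <;>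
      by_cases h2 : colChars body i = [] <;>
        simp only [List.foldl_cons, stepA', stepB', stepA, stepB, h1, h2, ne_eq,
          not_true_eq_false, not_false_eq_true, if_true, if_false, ite_true, List.nil_append]
    · exact ih out c ns
    · rw [hval]; exact ih out c (ns ++ [_])
    · rw [hinit, ih (out + evalGroup (c, ns)) _ [],
        groups_shift body chars idxs [(c, ns)] _ []]
      simp [evalGroups, evalGroup]
      ring
    · rw [hinit, hval, List.nil_append,
        ih (out + evalGroup (c, ns)) _ [_],
        groups_shift body chars idxs [(c, ns)] _ _]
      simp [evalGroups, evalGroup]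
      ring

-- ===== VERDICT (by name: the statement is the Claim_ definition above) =====
theorem part_2_spec : Claim_equal_part_2 := by
  intro num_lines _hdom _hpre
  unfold Spec_part_2
  simp only [part_2, part_2_alt]
  rw [PySem.List.enumerate_eq_map_pyRange _ ' ', List.foldl_map, List.foldl_map]
  have h := key (PySem.List.slice num_lines none (some (PySem.List.len num_lines - 1)))
      (PySem.List.pyGetD num_lines (-1) "").toList
      (PySem.List.pyRange 0 (PySem.List.len (PySem.List.pyGetD num_lines (-1) "").toList) 1)
      0 '+' []
  simp only [evalGroup, List.foldl_nil] at h
  simpa [stepA', stepB', finishB, evalGroups] using h
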